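-- pv_equiv track=rewrite | github.com/Held0fTheWelt/BLACKVEIN | MVP/backend/app/runtime/narrative_threads.py | _merge_evidence
-- ===== SOURCE A (Python) =====
-- _MAX_EVIDENCE = 6
--
-- def _merge_evidence(existing: list[str], new_tokens: list[str]) -> list[str]:
--     merged: list[str] = []
--     seen: set[str] = set()
--     for x in list(existing) + new_tokens:
--         if x not in seen:
--             seen.add(x)
--             merged.append(x)
--         if len(merged) >= _MAX_EVIDENCE:
--             break
--     return merged
-- ===== SOURCE B (Python) =====
-- _MAX_EVIDENCE = 6
--
-- def _merge_evidence(existing: list[str], new_tokens: list[str]) -> list[str]: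
--     merged: list[str] = []
--     rest = list(existing) + new_tokens
--     while rest and len(merged) < _MAX_EVIDENCE:
--         head = rest[0]
--         merged.append(head)
--         rest = [t for t in rest[1:] if t != head]
--     return merged
-- ===== Notes on version B (the rewrite author's own statement) =====
-- stated objective: alternative
-- what changed: B replaces A's single pass with a seen-set and membership tests by a peeling dedup: repeatedly move the head token to the output and filter all its duplicates out of the remainder, stopping after the cap of 6 peels; no membership structure at all.
import Mathlib
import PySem

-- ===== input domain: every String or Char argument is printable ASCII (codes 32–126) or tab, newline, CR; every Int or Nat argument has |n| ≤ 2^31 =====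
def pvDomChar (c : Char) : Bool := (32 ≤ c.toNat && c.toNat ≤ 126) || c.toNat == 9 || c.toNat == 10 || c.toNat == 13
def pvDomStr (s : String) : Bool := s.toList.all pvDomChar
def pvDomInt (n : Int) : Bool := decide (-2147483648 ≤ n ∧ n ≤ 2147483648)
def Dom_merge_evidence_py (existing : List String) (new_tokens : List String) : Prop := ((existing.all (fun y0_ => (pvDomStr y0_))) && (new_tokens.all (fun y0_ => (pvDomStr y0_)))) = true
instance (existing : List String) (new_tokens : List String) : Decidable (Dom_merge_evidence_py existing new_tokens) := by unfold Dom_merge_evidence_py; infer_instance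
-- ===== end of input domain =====

-- B deduplicates by peeling: repeatedly move the head token to the output and filter
-- all its duplicates out of the remainder, stopping after the cap of 6 peels, instead
-- of A's single pass with a seen-set and membership tests; objective: alternative.


-- ===== PORT A =====
-- the for-loop of A: state (merged, seen); per element: conditional append, then break test
def mergeLoopA : List String → List String → PySem.Set String → List String
  | [], merged, _ => merged
  | x :: xs, merged, seen =>
    let p := if x ∈ seen then (merged, seen) else (merged ++ [x], PySem.Set.add seen x)
    if 6 ≤ p.1.length then p.1 else mergeLoopA xs p.1 p.2

def merge_evidence_py (existing : List String) (new_tokens : List String) : List String :=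
  mergeLoopA (existing ++ new_tokens) [] []

-- ===== PORT B =====
-- Source B's while-loop: while rest is nonempty and merged is below the cap,
-- peel the head onto merged and filter its duplicates out of the remainder
def peelB : List String → List String → List String
  | [], merged => merged
  | x :: rest, merged =>
    if merged.length < 6 then peelB (rest.filter (fun t => t ≠ x)) (merged ++ [x]) else merged
termination_by rest _ => rest.length
decreasing_by
  simp only [List.length_unattach]
  exact Nat.lt_succ_of_le (le_trans (List.length_filter_le _ _) (Nat.le_of_eq List.length_attach))

def merge_evidence_py_alt (existing : List String) (new_tokens : List String) : List String :=
  peelB (existing ++ new_tokens) []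

-- ===== PRECONDITION & SPEC =====
def Spec_merge_evidence_py (existing : List String) (new_tokens : List String) (out : List String) : Prop := out = merge_evidence_py_alt existing new_tokens
instance (existing : List String) (new_tokens : List String) (out : List String) : Decidable (Spec_merge_evidence_py existing new_tokens out) := by unfold Spec_merge_evidence_py; infer_instance

-- ===== CLAIM (what is proved, stated in full; the proofs are below) =====
def Claim_equal_merge_evidence_py : Prop := ∀ (existing : List String) (new_tokens : List String), Dom_merge_evidence_py existing new_tokens → Spec_merge_evidence_py existing new_tokens (merge_evidence_py existing new_tokens)

-- ===== LEMMAS AND PROOFS =====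

-- the non-tail-recursive view of B's peeling loop (proof device only)
def nubB : List String → List String
  | [] => []
  | x :: xs => x :: nubB (xs.filter (fun t => t ≠ x))
termination_by l => l.length
decreasing_by
  simp only [List.length_unattach]
  exact Nat.lt_succ_of_le (le_trans (List.length_filter_le _ _) (Nat.le_of_eq List.length_attach))

lemma peelB_eq_nubB_aux (n : Nat) : ∀ (l : List String), l.length ≤ n → ∀ merged, merged.length ≤ 6 → peelB l merged = (merged ++ nubB l).take 6 := by
  induction n with
  | zero =>
    intro l h merged hm
    have : l = [] := List.eq_nil_of_length_eq_zero (Nat.le_zero.mp h)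
    subst this
    rw [peelB, nubB, List.append_nil, List.take_of_length_le hm]
  | succ n ih =>
    intro l h merged hm
    cases l with
    | nil => rw [peelB, nubB, List.append_nil, List.take_of_length_le hm]
    | cons x xs =>
      by_cases hlt : merged.length < 6
      · have hlen : (xs.filter (fun t => t ≠ x)).length ≤ n := by
          have := List.length_filter_le (fun t => decide (t ≠ x)) xs
          simp at h
          omega
        rw [peelB, if_pos hlt, nubB, ih _ hlen (merged ++ [x]) (by simp; omega)]
        rw [List.append_assoc, List.singleton_append]
      · have h6 : merged.length = 6 := by omega
        rw [peelB, if_neg hlt, nubB, ← h6, List.take_left]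

lemma peelB_eq_nubB (l : List String) : peelB l [] = (nubB l).take 6 := by
  rw [peelB_eq_nubB_aux l.length l (le_refl _) [] (by simp), List.nil_append]

-- A's loop equals "merged ++ nub of the rest with merged's elements removed, truncated to 6"
lemma mergeLoopA_eq (xs : List String) :
    ∀ (merged : List String) (seen : PySem.Set String),
      (∀ y, y ∈ seen ↔ y ∈ merged) → merged.length < 6 →
      mergeLoopA xs merged seen
        = (merged ++ nubB (xs.filter (fun t => t ∉ merged))).take 6 := by
  induction xs with
  | nil =>
    intro merged seen _ hlen
    rw [List.filter_nil, nubB, List.append_nil, List.take_of_length_le (Nat.le_of_lt hlen)]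
    simp [mergeLoopA]
  | cons x xs ih =>
    intro merged seen hmem hlen
    by_cases hx : x ∈ seen
    · have hxm : x ∈ merged := (hmem x).mp hx
      simp only [mergeLoopA, if_pos hx]
      rw [if_neg (by omega)]
      rw [ih merged seen hmem hlen]
      have : (x :: xs).filter (fun t => t ∉ merged) = xs.filter (fun t => t ∉ merged) := by
        simp [hxm]
      rw [this]
    · have hxm : x ∉ merged := fun h => hx ((hmem x).mpr h)
      have hfilter : (x :: xs).filter (fun t => t ∉ merged)
          = x :: xs.filter (fun t => t ∉ merged) := by
        simp [hxm]
      have hfilter2 : (xs.filter (fun t => t ∉ merged)).filter (fun t => t ≠ x)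
          = xs.filter (fun t => t ∉ merged ++ [x]) := by
        rw [List.filter_filter]
        apply List.filter_congr
        intro t _
        simp [List.mem_append]
        rw [Bool.and_comm]
      have hnub : nubB ((x :: xs).filter (fun t => t ∉ merged))
          = x :: nubB (xs.filter (fun t => t ∉ merged ++ [x])) := by
        rw [hfilter, nubB, hfilter2]
      simp only [mergeLoopA, if_neg hx]
      by_cases hfull : 6 ≤ (merged ++ [x]).length
      · rw [if_pos (by simpa using hfull)]
        have hlen6 : (merged ++ [x]).length = 6 := by simp at hfull ⊢; omega
        rw [hnub]
        have : merged ++ x :: nubB (xs.filter (fun t => t ∉ merged ++ [x]))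
            = (merged ++ [x]) ++ nubB (xs.filter (fun t => t ∉ merged ++ [x])) := by
          simp
        rw [this, ← hlen6, List.take_left]
      · rw [if_neg (by simpa using hfull)]
        have hmem' : ∀ y, y ∈ PySem.Set.add seen x ↔ y ∈ merged ++ [x] := by
          intro y
          have : PySem.Set.add seen x = seen ++ [x] := by simp [PySem.Set.add, hx]
          simp [this, hmem y]
        rw [ih (merged ++ [x]) (PySem.Set.add seen x) hmem' (by simp at hfull ⊢; omega)]
        rw [hnub]
        simp

-- ===== VERDICT (by name: the statement is the Claim_ definition above) =====
theorem merge_evidence_py_spec : Claim_equal_merge_evidence_py := by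
  intro existing new_tokens _
  unfold Spec_merge_evidence_py merge_evidence_py merge_evidence_py_alt
  rw [mergeLoopA_eq (existing ++ new_tokens) [] [] (by simp) (by norm_num)]
  rw [peelB_eq_nubB]
  simp
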